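-- pv_equiv track=rewrite | github.com/AxelBremer/chants | code/pycantus/volpiano.py | add_flats
-- ===== SOURCE A (Python) =====
-- def add_flats(volpiano, omit_notes=False):
--     """
--     Adds flats to all lowered notes in the scopes of accidentals
--
--     In CANTUS transcriptions, flats are added only once, directly in front
--     of the B. This function adds flat signs before all successive Bs until
--     the next natural sign. Note that all natural signs are removed.
--
--     This function does not assume that when a note is flattened, the notes an
--     octave higher and lower are also flattened. (So it assumes that after a
--     central b flat `ij`, a lower b-flat `yb` indeed has an accidental)
--
--
--     Flat/Nat. Note  Description
--     --------------------------
--     i/I       j     Central b flat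
--     y/Y       b     Low b flat
--     z/Z       q     High b flat
--     w/W       e     Low e flat
--     x/X       m     High e flat
--
--     Params:
--     - omit_notes    if True only shows the accidental, not the actual note;
--                     so accidentals function as notes
--     """
--     in_scope = { 'i': False, 'y': False, 'z': False, 'w': False, 'x': False}
--     output = ''
--     for char in volpiano:
--         # If the character is a flat, enter its scope
--         if char in 'iyzwx':
--             in_scope[char] = True
--
--         # If a natural, exit the corresponding flats scope
--         elif char in 'IYZWX':
--             in_scope[char.lower()] = False
--
--         # Central b flat?
--         elif in_scope['i'] and char == 'j':
--             output += 'i' if omit_notes else 'ij'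
--
--         # Low b flat?
--         elif in_scope['y'] and char == 'b':
--             output += 'y' if omit_notes else 'yb'
--
--         # High b flat?
--         elif in_scope['z'] and char == 'q':
--             output += 'z' if omit_notes else 'zq'
--
--         # Low e flat?
--         elif in_scope['w'] and char == 'e':
--             output += 'w' if omit_notes else 'we'
--
--         # High e flat?
--         elif in_scope['x'] and char == 'm':
--             output += 'x' if omit_notes else 'xm'
--
--         # Another note
--         else:
--             output += char
--
--     return output
-- ===== SOURCE B (Python) =====
-- _TABLE = [('i', 'I', 'j'), ('y', 'Y', 'b'), ('z', 'Z', 'q'), ('w', 'W', 'e'), ('x', 'X', 'm')]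
--
--
-- def _add_flat(s, flat, nat, note, omit):
--     out = []
--     scope = False
--     for c in s:
--         if c == flat:
--             scope = True
--         elif c == nat:
--             scope = False
--         elif scope and c == note:
--             out.append(flat if omit else flat + note)
--         else:
--             out.append(c)
--     return ''.join(out)
--
--
-- def add_flats(volpiano, omit_notes=False):
--     s = volpiano
--     for flat, nat, note in _TABLE:
--         s = _add_flat(s, flat, nat, note, omit_notes)
--     return s
-- ===== Notes on version B (the rewrite author's own statement) =====
-- stated objective: simpler
-- what changed: Replaced A's single interleaved pass with a dict of five scope flags and five copy-pasted branches by one generic single-flag channel scanner applied once per accidental channel from a (flat, natural, note) table.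
import Mathlib
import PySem

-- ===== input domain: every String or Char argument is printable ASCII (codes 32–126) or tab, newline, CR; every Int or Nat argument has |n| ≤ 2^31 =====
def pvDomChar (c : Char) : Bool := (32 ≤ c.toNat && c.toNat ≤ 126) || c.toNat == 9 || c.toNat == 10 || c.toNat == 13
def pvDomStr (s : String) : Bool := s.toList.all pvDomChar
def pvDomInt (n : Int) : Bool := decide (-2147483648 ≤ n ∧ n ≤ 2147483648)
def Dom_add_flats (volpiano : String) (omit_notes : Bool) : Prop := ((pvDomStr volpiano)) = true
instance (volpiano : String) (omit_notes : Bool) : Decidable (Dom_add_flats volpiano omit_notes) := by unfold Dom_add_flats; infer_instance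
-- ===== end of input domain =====

-- B factors the five repeated accidental branches into one generic single-scope scan applied
-- once per accidental channel (objective: simpler, same cost).

-- ===== PORT A =====
-- A's loop: one pass keeping a dict of the five scope flags; output built char by char.
def addFlatsLoop (omit_notes : Bool) : PySem.Dict Char Bool → List Char → List Char
  | _, [] => []
  | d, c :: cs =>
    -- `char in 'iyzwx'` (string membership of a single char, exact as list membership)
    if ['i', 'y', 'z', 'w', 'x'].contains c then
      addFlatsLoop omit_notes (d.insert c true) cs
    else if ['I', 'Y', 'Z', 'W', 'X'].contains c then
      addFlatsLoop omit_notes (d.insert (PySem.Chars.lowerChar c) false) cs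
    else if d.getD 'i' false && c = 'j' then
      (if omit_notes then ['i'] else ['i', 'j']) ++ addFlatsLoop omit_notes d cs
    else if d.getD 'y' false && c = 'b' then
      (if omit_notes then ['y'] else ['y', 'b']) ++ addFlatsLoop omit_notes d cs
    else if d.getD 'z' false && c = 'q' then
      (if omit_notes then ['z'] else ['z', 'q']) ++ addFlatsLoop omit_notes d cs
    else if d.getD 'w' false && c = 'e' then
      (if omit_notes then ['w'] else ['w', 'e']) ++ addFlatsLoop omit_notes d cs
    else if d.getD 'x' false && c = 'm' then
      (if omit_notes then ['x'] else ['x', 'm']) ++ addFlatsLoop omit_notes d cs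
    else
      c :: addFlatsLoop omit_notes d cs

def add_flats (volpiano : String) (omit_notes : Bool) : String :=
  String.mk (addFlatsLoop omit_notes
    (PySem.Dict.ofList [('i', false), ('y', false), ('z', false), ('w', false), ('x', false)])
    volpiano.toList)

-- ===== PORT B =====
-- B's helper: one channel (flat, nat, note) resolved in a single scan with one boolean flag.
def addFlatChan (flat nat note : Char) (om : Bool) : Bool → List Char → List Char
  | _, [] => []
  | scope, c :: cs =>
    if c = flat then addFlatChan flat nat note om true cs
    else if c = nat then addFlatChan flat nat note om false cs
    else if scope && c = note then
      (if om then [flat] else [flat, note]) ++ addFlatChan flat nat note om scope cs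
    else c :: addFlatChan flat nat note om scope cs

def add_flats_alt (volpiano : String) (omit_notes : Bool) : String :=
  String.mk (([('i', 'I', 'j'), ('y', 'Y', 'b'), ('z', 'Z', 'q'), ('w', 'W', 'e'), ('x', 'X', 'm')].foldl
    (fun s (t : Char × Char × Char) => addFlatChan t.1 t.2.1 t.2.2 omit_notes false s)
    volpiano.toList))

-- ===== PRECONDITION & SPEC =====
def Spec_add_flats (volpiano : String) (omit_notes : Bool) (out : String) : Prop := out = add_flats_alt volpiano omit_notes
instance (volpiano : String) (omit_notes : Bool) (out : String) : Decidable (Spec_add_flats volpiano omit_notes out) := by unfold Spec_add_flats; infer_instance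

-- ===== CLAIM (what is proved, stated in full; the proofs are below) =====
def Claim_equal_add_flats : Prop := ∀ (volpiano : String) (omit_notes : Bool), Dom_add_flats volpiano omit_notes → Spec_add_flats volpiano omit_notes (add_flats volpiano omit_notes)

-- ===== LEMMAS AND PROOFS =====

theorem add_flats_main (o : Bool) (cs : List Char) : ∀ (d : PySem.Dict Char Bool),
    addFlatChan 'x' 'X' 'm' o (d.getD 'x' false) (addFlatChan 'w' 'W' 'e' o (d.getD 'w' false)
      (addFlatChan 'z' 'Z' 'q' o (d.getD 'z' false) (addFlatChan 'y' 'Y' 'b' o (d.getD 'y' false)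
        (addFlatChan 'i' 'I' 'j' o (d.getD 'i' false) cs))))
    = addFlatsLoop o d cs := by
  induction cs with
  | nil => intro d; simp [addFlatChan, addFlatsLoop]
  | cons c cs ih =>
    intro d
    by_cases h1 : c = 'i'
    · subst h1; simp only [addFlatsLoop]; norm_num
      rw [← ih (d.insert 'i' true)]
      simp [addFlatChan, PySem.Dict.getD_insert]
    · 
      by_cases h2 : c = 'y'
      · subst h2; simp only [addFlatsLoop]; norm_num
        rw [← ih (d.insert 'y' true)]
        simp [addFlatChan, PySem.Dict.getD_insert]
      · 
        by_cases h3 : c = 'z'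
        · subst h3; simp only [addFlatsLoop]; norm_num
          rw [← ih (d.insert 'z' true)]
          simp [addFlatChan, PySem.Dict.getD_insert]
        · 
          by_cases h4 : c = 'w'
          · subst h4; simp only [addFlatsLoop]; norm_num
            rw [← ih (d.insert 'w' true)]
            simp [addFlatChan, PySem.Dict.getD_insert]
          · 
            by_cases h5 : c = 'x'
            · subst h5; simp only [addFlatsLoop]; norm_num
              rw [← ih (d.insert 'x' true)]
              simp [addFlatChan, PySem.Dict.getD_insert]
            · 
              by_cases h6 : c = 'I'
              · subst h6; simp only [addFlatsLoop]; norm_num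
                rw [show PySem.Chars.lowerChar 'I' = 'i' from by decide]
                rw [← ih (d.insert 'i' false)]
                simp [addFlatChan, PySem.Dict.getD_insert]
              · 
                by_cases h7 : c = 'Y'
                · subst h7; simp only [addFlatsLoop]; norm_num
                  rw [show PySem.Chars.lowerChar 'Y' = 'y' from by decide]
                  rw [← ih (d.insert 'y' false)]
                  simp [addFlatChan, PySem.Dict.getD_insert]
                · 
                  by_cases h8 : c = 'Z'
                  · subst h8; simp only [addFlatsLoop]; norm_num
                    rw [show PySem.Chars.lowerChar 'Z' = 'z' from by decide]
                    rw [← ih (d.insert 'z' false)]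
                    simp [addFlatChan, PySem.Dict.getD_insert]
                  · 
                    by_cases h9 : c = 'W'
                    · subst h9; simp only [addFlatsLoop]; norm_num
                      rw [show PySem.Chars.lowerChar 'W' = 'w' from by decide]
                      rw [← ih (d.insert 'w' false)]
                      simp [addFlatChan, PySem.Dict.getD_insert]
                    · 
                      by_cases h10 : c = 'X'
                      · subst h10; simp only [addFlatsLoop]; norm_num
                        rw [show PySem.Chars.lowerChar 'X' = 'x' from by decide]
                        rw [← ih (d.insert 'x' false)]
                        simp [addFlatChan, PySem.Dict.getD_insert]
                      · 
                        by_cases h11 : c = 'j'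
                        · subst h11; simp only [addFlatsLoop]; norm_num
                          by_cases hs : d.getD 'i' false = true
                          · rw [← ih d]; cases o <;> simp [addFlatChan, hs]
                          · rw [← ih d]; simp [addFlatChan, hs]
                        · 
                          by_cases h12 : c = 'b'
                          · subst h12; simp only [addFlatsLoop]; norm_num
                            by_cases hs : d.getD 'y' false = true
                            · rw [← ih d]; cases o <;> simp [addFlatChan, hs]
                            · rw [← ih d]; simp [addFlatChan, hs]
                          · 
                            by_cases h13 : c = 'q'
                            · subst h13; simp only [addFlatsLoop]; norm_num
                              by_cases hs : d.getD 'z' false = true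
                              · rw [← ih d]; cases o <;> simp [addFlatChan, hs]
                              · rw [← ih d]; simp [addFlatChan, hs]
                            · 
                              by_cases h14 : c = 'e'
                              · subst h14; simp only [addFlatsLoop]; norm_num
                                by_cases hs : d.getD 'w' false = true
                                · rw [← ih d]; cases o <;> simp [addFlatChan, hs]
                                · rw [← ih d]; simp [addFlatChan, hs]
                              · 
                                by_cases h15 : c = 'm'
                                · subst h15; simp only [addFlatsLoop]; norm_num
                                  by_cases hs : d.getD 'x' false = true
                                  · rw [← ih d]; cases o <;> simp [addFlatChan, hs]
                                  · rw [← ih d]; simp [addFlatChan, hs]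
                                · simp only [addFlatsLoop]
                                  simp [addFlatChan, h1, h2, h3, h4, h5, h6, h7, h8, h9, h10, h11, h12, h13, h14, h15]
                                  rw [ih]

-- ===== VERDICT (by name: the statement is the Claim_ definition above) =====
theorem add_flats_spec : Claim_equal_add_flats := by
  intro v o _
  unfold Spec_add_flats add_flats add_flats_alt
  simp only [List.foldl]
  have h := add_flats_main o v.toList
    (PySem.Dict.ofList [('i', false), ('y', false), ('z', false), ('w', false), ('x', false)])
  rw [show (PySem.Dict.ofList [('i', false), ('y', false), ('z', false), ('w', false), ('x', false)]).getD 'i' false = false from by decide,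
      show (PySem.Dict.ofList [('i', false), ('y', false), ('z', false), ('w', false), ('x', false)]).getD 'y' false = false from by decide,
      show (PySem.Dict.ofList [('i', false), ('y', false), ('z', false), ('w', false), ('x', false)]).getD 'z' false = false from by decide,
      show (PySem.Dict.ofList [('i', false), ('y', false), ('z', false), ('w', false), ('x', false)]).getD 'w' false = false from by decide,
      show (PySem.Dict.ofList [('i', false), ('y', false), ('z', false), ('w', false), ('x', false)]).getD 'x' false = false from by decide] at h
  rw [h]
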